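-- pv_equiv track=rewrite | github.com/ayushmansingh2512/pythonocde | DSA/9.3_minnimumtime.py | minTimeToVisit
-- ===== SOURCE A (Python) =====
-- def minTimeToVisit(points):
--     res= 0
--     x1,y1 = points.pop()
--     while points:
--         x2, y2 = points.pop()
--         res += max(abs(y2 - y1) , abs(x2-x1))
--         x1,y1 = x2,y2
--     return res
-- ===== SOURCE B (Python) =====
-- def minTimeToVisit(points):
--     return sum(max(abs(x2 - x1), abs(y2 - y1))
--                for (x1, y1), (x2, y2) in zip(points, points[1:]))
-- ===== Notes on version B (the rewrite author's own statement) =====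
-- stated objective: idiomatic
-- what changed: Replaces A's destructive backward pop-loop carrying a running previous point with a non-mutating forward pairwise sum over zip(points, points[1:]) (Chebyshev distance is symmetric, so direction does not matter).
import Mathlib
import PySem

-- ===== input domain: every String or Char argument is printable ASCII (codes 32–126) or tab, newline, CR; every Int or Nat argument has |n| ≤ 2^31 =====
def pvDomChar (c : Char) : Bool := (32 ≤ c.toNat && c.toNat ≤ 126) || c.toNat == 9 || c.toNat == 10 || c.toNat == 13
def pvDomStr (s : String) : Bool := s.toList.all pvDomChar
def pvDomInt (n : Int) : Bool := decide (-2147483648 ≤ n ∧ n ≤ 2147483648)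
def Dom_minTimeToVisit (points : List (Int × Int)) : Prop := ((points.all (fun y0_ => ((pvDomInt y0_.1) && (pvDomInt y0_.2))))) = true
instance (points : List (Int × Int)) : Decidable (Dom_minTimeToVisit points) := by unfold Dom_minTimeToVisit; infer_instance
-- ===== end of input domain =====

-- B replaces A's destructive backward pop-loop with a non-mutating forward pairwise sum (idiomatic);
-- equivalence is about the RETURN value only: A empties its argument list, B does not mutate it.

-- ===== PORT A =====
-- `points.pop()` removes and returns the LAST element; the while-loop keeps popping,
-- carrying the previous point (x1,y1) and the accumulator res.  Modelled by structural
-- recursion on the list state: getLast? is the popped element, dropLast the remaining list.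
def minTimeToVisit_loop (pts : List (Int × Int)) (x1 y1 res : Int) : Int :=
  if hp : pts = [] then res                       -- `while points:` fails: return res
  else
    let p := pts.getLast hp                       -- x2, y2 = points.pop()
    minTimeToVisit_loop pts.dropLast p.1 p.2 (res + max |p.2 - y1| |p.1 - x1|)
termination_by pts.length
decreasing_by
  cases pts with
  | nil => exact absurd rfl hp
  | cons a t => simp [List.length_dropLast]

def minTimeToVisit (points : List (Int × Int)) : Int :=
  match points.getLast? with
  | none => 0                                     -- x1,y1 = points.pop() raises IndexError (outside Pre_)
  | some (x1, y1) => minTimeToVisit_loop points.dropLast x1 y1 0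

-- ===== PORT B =====
-- Source B: sum(max(abs(x2-x1), abs(y2-y1)) for (x1,y1),(x2,y2) in zip(points, points[1:]))
def minTimeToVisit_alt (points : List (Int × Int)) : Int :=
  ((points.zip (points.drop 1)).map
    (fun pq => max |pq.2.1 - pq.1.1| |pq.2.2 - pq.1.2|)).sum

-- ===== PRECONDITION & SPEC =====
-- Pre_ excludes only the empty list, on which the Python A raises IndexError.
def Pre_minTimeToVisit (points : List (Int × Int)) : Prop := points ≠ []
instance (points : List (Int × Int)) : Decidable (Pre_minTimeToVisit points) := by
  unfold Pre_minTimeToVisit; infer_instance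

def pvWitness_minTimeToVisit : (List (Int × Int)) := [(1, 2), (4, 6), (0, 0)]

def Spec_minTimeToVisit (points : List (Int × Int)) (out : Int) : Prop := out = minTimeToVisit_alt points
instance (points : List (Int × Int)) (out : Int) : Decidable (Spec_minTimeToVisit points out) := by unfold Spec_minTimeToVisit; infer_instance

-- ===== CLAIM (what is proved, stated in full; the proofs are below) =====
def Claim_equal_minTimeToVisit : Prop := ∀ (points : List (Int × Int)), Dom_minTimeToVisit points → Pre_minTimeToVisit points → Spec_minTimeToVisit points (minTimeToVisit points)

-- ===== LEMMAS AND PROOFS =====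

-- Chebyshev distance between two points, and the path sum of p followed by a list.
def cheb (p q : Int × Int) : Int := max |q.2 - p.2| |q.1 - p.1|

def pathSum : (Int × Int) → List (Int × Int) → Int
  | _, [] => 0
  | p, q :: rest => cheb p q + pathSum q rest

def seqSum : List (Int × Int) → Int
  | [] => 0
  | h :: t => pathSum h t

theorem cheb_comm (p q : Int × Int) : cheb p q = cheb q p := by
  simp [cheb, abs_sub_comm]

theorem pathSum_append (l : List (Int × Int)) (p q : Int × Int) :
    pathSum p (l ++ [q]) = pathSum p l + cheb (l.getLastD p) q := by
  induction l generalizing p with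
  | nil => simp [pathSum, List.getLastD]
  | cons x t ih =>
      simp only [List.cons_append, pathSum, ih x, List.getLastD_cons]
      ring

theorem pathSum_reverse (l : List (Int × Int)) (p : Int × Int) :
    pathSum p l.reverse = seqSum (l ++ [p]) := by
  induction l generalizing p with
  | nil => simp [pathSum, seqSum]
  | cons x t ih =>
      have hrev : (x :: t).reverse = t.reverse ++ [x] := by simp
      rw [hrev, pathSum_append, ih p]
      cases t with
      | nil => simp [seqSum, pathSum, List.getLastD, cheb_comm]
      | cons y t' =>
          have hl : (y :: t').reverse.getLastD p = y := by
            have := List.getLast?_reverse (l := y :: t')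
            simp [List.getLastD_eq_getLast?, this]
          simp only [List.cons_append, seqSum, pathSum, hl, cheb_comm x y]
          ring

theorem loop_eq (l : List (Int × Int)) (x1 y1 res : Int) :
    minTimeToVisit_loop l x1 y1 res = res + pathSum (x1, y1) l.reverse := by
  induction l using List.reverseRecOn generalizing x1 y1 res with
  | nil => rw [minTimeToVisit_loop]; simp [pathSum]
  | append_singleton t p ih =>
      rw [minTimeToVisit_loop]
      have hne : t ++ [p] ≠ [] := by simp
      rw [dif_neg hne]
      simp only [List.getLast_append_singleton, List.dropLast_concat]
      rw [ih]
      obtain ⟨x2, y2⟩ := p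
      simp [pathSum, cheb]
      ring

theorem alt_eq_seqSum (l : List (Int × Int)) : minTimeToVisit_alt l = seqSum l := by
  induction l with
  | nil => simp [minTimeToVisit_alt, seqSum]
  | cons a rest ih =>
      cases rest with
      | nil => simp [minTimeToVisit_alt, seqSum, pathSum]
      | cons b t =>
          simp only [minTimeToVisit_alt, List.drop_succ_cons, List.drop_zero,
            List.zip_cons_cons, List.map_cons, List.sum_cons] at *
          simp [seqSum, pathSum, cheb, ih, max_comm]

-- ===== VERDICT (by name: the statement is the Claim_ definition above) =====
theorem minTimeToVisit_spec : Claim_equal_minTimeToVisit := by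
  intro points _ hpre
  unfold Spec_minTimeToVisit
  obtain ⟨l, p, rfl⟩ := (points.eq_nil_or_concat').resolve_left hpre
  obtain ⟨x1, y1⟩ := p
  rw [alt_eq_seqSum]
  unfold minTimeToVisit
  simp only [List.getLast?_append, List.getLast?_singleton, Option.some_or,
    List.dropLast_concat]
  rw [loop_eq, pathSum_reverse]
  ring
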